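-- pv_equiv track=rewrite | github.com/eduardroid/commit-radar | backend/post_rules.py | has_only_tests
-- ===== SOURCE A (Python) =====
-- from typing import Any, Dict, List
--
-- def has_test_files(files: List[str]) -> bool:
--     """
--     True si hay archivos de test según heurística simple.
--     """
--     for f in files:
--         lf = f.lower()
--         if lf.startswith("tests/") or "/tests/" in lf:
--             return True
--         if lf.endswith("_test.py") or lf.endswith("test.py"):
--             return True
--     return False
--
-- def has_only_tests(files: List[str]) -> bool:
--     if not files:
--         return False
--     if not has_test_files(files):
--         return False
--     # si todos parecen tests, lo consideramos "solo tests"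
--     test_like = 0
--     for f in files:
--         lf = f.lower()
--         if (
--             lf.startswith("tests/")
--             or "/tests/" in lf
--             or lf.endswith("_test.py")
--             or lf.endswith("test.py")
--         ):
--             test_like += 1
--     return test_like == len(files)
-- ===== SOURCE B (Python) =====
-- def has_only_tests(files):
--     if not files:
--         return False
--     for f in files:
--         lf = f.lower()
--         if not (
--             lf.startswith("tests/")
--             or "/tests/" in lf
--             or lf.endswith("_test.py")
--             or lf.endswith("test.py")
--         ):
--             return False
--     return True
-- ===== Notes on version B (the rewrite author's own statement) =====
-- stated objective: simpler
-- what changed: The separate has_test_files existence scan and the counting pass (test_like == len) are collapsed into one early-return loop: the existence check is redundant once every file is test-like and the list is non-empty.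
import Mathlib
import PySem

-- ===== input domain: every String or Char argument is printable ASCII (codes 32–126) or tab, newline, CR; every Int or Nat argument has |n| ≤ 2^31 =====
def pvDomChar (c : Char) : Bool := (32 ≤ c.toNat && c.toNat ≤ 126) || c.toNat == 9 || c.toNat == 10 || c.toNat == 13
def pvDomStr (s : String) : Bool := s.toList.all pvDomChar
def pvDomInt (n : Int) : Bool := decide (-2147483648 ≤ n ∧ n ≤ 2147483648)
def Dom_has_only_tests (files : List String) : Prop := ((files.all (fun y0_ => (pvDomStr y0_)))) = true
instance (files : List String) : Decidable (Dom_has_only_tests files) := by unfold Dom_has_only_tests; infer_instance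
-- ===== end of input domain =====

-- B collapses A's separate existence scan and counting pass into one early-return loop (simpler).

-- ===== PORT A =====
-- helper has_test_files: early-return loop over files
def hasTestFiles : List String → Bool
  | [] => false
  | f :: rest =>
    let lf := PySem.Str.lower f
    if PySem.Str.startswith lf "tests/" || PySem.Str.isIn "/tests/" lf then true
    else if PySem.Str.endswith lf "_test.py" || PySem.Str.endswith lf "test.py" then true
    else hasTestFiles rest

def has_only_tests (files : List String) : Bool :=
  if files.isEmpty then false
  else if !hasTestFiles files then false
  else
    let test_like : Int := files.foldl (fun acc f =>
      let lf := PySem.Str.lower f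
      if PySem.Str.startswith lf "tests/"
          || PySem.Str.isIn "/tests/" lf
          || PySem.Str.endswith lf "_test.py"
          || PySem.Str.endswith lf "test.py"
      then acc + 1 else acc) 0
    test_like == (files.length : Int)

-- ===== PORT B =====
def isTestLike (f : String) : Bool :=
  let lf := PySem.Str.lower f
  PySem.Str.startswith lf "tests/"
    || PySem.Str.isIn "/tests/" lf
    || PySem.Str.endswith lf "_test.py"
    || PySem.Str.endswith lf "test.py"

-- early-return loop: false on the first non-test file
def altLoop : List String → Bool
  | [] => true
  | f :: rest => if !isTestLike f then false else altLoop rest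

def has_only_tests_alt (files : List String) : Bool :=
  if files.isEmpty then false
  else altLoop files

-- ===== PRECONDITION & SPEC =====
def Spec_has_only_tests (files : List String) (out : Bool) : Prop := out = has_only_tests_alt files
instance (files : List String) (out : Bool) : Decidable (Spec_has_only_tests files out) := by unfold Spec_has_only_tests; infer_instance

-- ===== CLAIM (what is proved, stated in full; the proofs are below) =====
def Claim_equal_has_only_tests : Prop := ∀ (files : List String), Dom_has_only_tests files → Spec_has_only_tests files (has_only_tests files)

-- ===== LEMMAS AND PROOFS =====

-- A's helper is 'any isTestLike'
theorem hasTestFiles_eq_any (l : List String) : hasTestFiles l = l.any isTestLike := by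
  induction l with
  | nil => rfl
  | cons f rest ih =>
    simp only [hasTestFiles, List.any_cons, isTestLike, ← ih]
    by_cases h1 : PySem.Str.startswith (PySem.Str.lower f) "tests/"
        || PySem.Str.isIn "/tests/" (PySem.Str.lower f) <;>
    by_cases h2 : PySem.Str.endswith (PySem.Str.lower f) "_test.py"
        || PySem.Str.endswith (PySem.Str.lower f) "test.py" <;>
      simp_all

-- B's loop is 'all isTestLike'
theorem altLoop_eq_all (l : List String) : altLoop l = l.all isTestLike := by
  induction l with
  | nil => rfl
  | cons f rest ih => by_cases h : isTestLike f <;> simp [altLoop, h, ih]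

-- A's counting loop counts isTestLike
theorem count_eq_countP (l : List String) (a : Int) :
    l.foldl (fun acc f =>
      let lf := PySem.Str.lower f
      if PySem.Str.startswith lf "tests/"
          || PySem.Str.isIn "/tests/" lf
          || PySem.Str.endswith lf "_test.py"
          || PySem.Str.endswith lf "test.py"
      then acc + 1 else acc) a = a + (l.countP isTestLike : Int) := by
  have hf : (fun (acc : Int) f =>
      let lf := PySem.Str.lower f
      if PySem.Str.startswith lf "tests/"
          || PySem.Str.isIn "/tests/" lf
          || PySem.Str.endswith lf "_test.py"
          || PySem.Str.endswith lf "test.py"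
      then acc + 1 else acc)
      = (fun (acc : Int) f => if isTestLike f then acc + 1 else acc) := rfl
  rw [hf]
  induction l generalizing a with
  | nil => simp
  | cons f rest ih =>
    by_cases h : isTestLike f <;> simp [h, ih]; omega

-- ===== VERDICT (by name: the statement is the Claim_ definition above) =====
theorem has_only_tests_spec : Claim_equal_has_only_tests := by
  intro files _
  show has_only_tests files = has_only_tests_alt files
  unfold has_only_tests has_only_tests_alt
  by_cases he : files.isEmpty
  · simp [he]
  · simp only [he]
    rw [count_eq_countP, hasTestFiles_eq_any, altLoop_eq_all]
    by_cases hall : files.all isTestLike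
    · have hany : files.any isTestLike = true := by
        cases files with
        | nil => simp [List.isEmpty] at he
        | cons f rest => simp only [List.all_cons, Bool.and_eq_true] at hall; simp [hall.1]
      have : files.countP isTestLike = files.length :=
        (List.countP_eq_length).mpr (by simpa [List.all_eq_true] using hall)
      simp [hany, hall, this]
    · by_cases hany : files.any isTestLike
      · have : files.countP isTestLike ≠ files.length := by
          intro h
          exact hall (by simpa [List.all_eq_true] using (List.countP_eq_length).mp h)
        have hlt : (files.countP isTestLike : Int) ≠ (files.length : Int) := by
          exact_mod_cast this
        simp only [hany, Bool.not_true, zero_add]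
        simp [hlt, hall]
      · simp [hany, hall]
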